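-- pv_equiv track=rewrite | github.com/TomaszWs/Codewars | 6kyu/Setting-Places-for-the-Dead.py | set_table
-- ===== SOURCE A (Python) =====
-- CORNERS = {letter: 3 * i for i, letters in enumerate(("QUTHCRDMZ", "WEVOXING", "JFABKPLY", "S")) for letter in letters}
--
-- def set_table(the_dead):
--     n = 12
--     table = ['_____'] * n
--     def find_seat(i, d):
--         for j in range(n):
--             k = (i + d * j) % n
--             if table[k] == '_____':
--                 return k, j
--     for name in the_dead[:12]:
--         p = CORNERS[name[0]]
--         p1, d1 = find_seat(p, -1)
--         p2, d2 = find_seat(p, 1)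
--         table[p1 if d1 <= d2 else p2] = name
--     return table
-- ===== SOURCE B (Python) =====
-- # Simpler: one interleaved scan (distance 0..11, negative seat before positive)
-- # replaces the two directional scans + distance comparison.
-- CORNERS = {
--     'A': 6, 'B': 6, 'C': 0, 'D': 0, 'E': 3, 'F': 6, 'G': 3,
--     'H': 0, 'I': 3, 'J': 6, 'K': 6, 'L': 6, 'M': 0, 'N': 3,
--     'O': 3, 'P': 6, 'Q': 0, 'R': 0, 'S': 9, 'T': 0, 'U': 0,
--     'V': 3, 'W': 3, 'X': 3, 'Y': 6, 'Z': 0,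
-- }
--
-- def _nearest_free(table, p):
--     for j in range(12):
--         for k in ((p - j) % 12, (p + j) % 12):
--             if table[k] == '_____':
--                 return k
--
-- def set_table(the_dead):
--     table = ['_____'] * 12
--     for name in the_dead[:12]:
--         table[_nearest_free(table, CORNERS[name[0]])] = name
--     return table
-- ===== Notes on version B (the rewrite author's own statement) =====
-- stated objective: simpler
-- what changed: Replaces the two directional find_seat scans plus the d1<=d2 distance comparison with a single interleaved scan over distances 0..11 that tries seat (p-j)%12 before (p+j)%12 and seats the guest at the first free seat found; CORNERS is a plain literal dict.
import Mathlib
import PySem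

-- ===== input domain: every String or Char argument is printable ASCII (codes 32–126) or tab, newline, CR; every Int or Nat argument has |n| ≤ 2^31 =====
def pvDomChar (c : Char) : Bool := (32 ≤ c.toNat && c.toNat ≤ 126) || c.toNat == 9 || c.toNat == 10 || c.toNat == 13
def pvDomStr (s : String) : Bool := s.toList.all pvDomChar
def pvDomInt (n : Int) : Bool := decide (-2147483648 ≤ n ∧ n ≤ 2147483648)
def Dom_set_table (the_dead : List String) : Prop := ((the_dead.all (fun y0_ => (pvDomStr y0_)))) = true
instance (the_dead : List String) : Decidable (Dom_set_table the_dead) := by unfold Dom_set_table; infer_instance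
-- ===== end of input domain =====

-- B replaces A's two directional find_seat scans plus the d1 <= d2 comparison by a
-- single interleaved scan over distances 0..11 (negative seat tried before positive),
-- with CORNERS as a plain literal dict; equal on Pre_ (objective: simpler).

-- ===== PORT A =====
-- CORNERS = {letter: 3*i for i, letters in enumerate(("QUTHCRDMZ","WEVOXING","JFABKPLY","S")) for letter in letters}
def cornersA : PySem.Dict Char Int :=
  (PySem.List.enumerate ["QUTHCRDMZ", "WEVOXING", "JFABKPLY", "S"] 0).foldl
    (fun d iw => iw.2.toList.foldl (fun d c => d.insert c (3 * iw.1)) d) PySem.Dict.empty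

-- def find_seat(i, d): for j in range(n): k = (i+d*j)%n; if table[k]=='_____': return k, j
-- (falls off the loop only when the table has no free seat, which no call reaches;
--  table[k] read via pyGetD: k = (…) % 12 is always in range for the 12-seat table)
def findSeatA (table : List String) (i d : Int) : Option (Int × Int) :=
  (PySem.List.pyRange 0 12 1).findSome? (fun j =>
    let k := PySem.Int.mod (i + d * j) 12
    if PySem.List.pyGetD table k "" == "_____" then some (k, j) else none)

def set_table (the_dead : List String) : List String :=
  (PySem.List.slice the_dead none (some 12)).foldl
    (fun table name =>
      match PySem.Str.pyGet? name 0 with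
      | none => table            -- Python: IndexError on name[0] (excluded by Pre_)
      | some c =>
        match cornersA.get? c with
        | none => table          -- Python: KeyError (excluded by Pre_)
        | some p =>
          match findSeatA table p (-1), findSeatA table p 1 with
          | some (p1, d1), some (p2, d2) =>
              table.set (if d1 ≤ d2 then p1 else p2).toNat name
          | some (p1, _), none => table.set p1.toNat name   -- unreachable: find_seat never returns None here
          | none, some (p2, _) => table.set p2.toNat name   -- unreachable
          | none, none => table)                            -- unreachable
    (PySem.List.pyRepeat ["_____"] 12)

-- ===== PORT B =====
def cornersB : PySem.Dict Char Int := PySem.Dict.ofList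
  [('A', 6), ('B', 6), ('C', 0), ('D', 0), ('E', 3), ('F', 6), ('G', 3),
   ('H', 0), ('I', 3), ('J', 6), ('K', 6), ('L', 6), ('M', 0), ('N', 3),
   ('O', 3), ('P', 6), ('Q', 0), ('R', 0), ('S', 9), ('T', 0), ('U', 0),
   ('V', 3), ('W', 3), ('X', 3), ('Y', 6), ('Z', 0)]

-- def _nearest_free(table, p): for j in range(12): for k in ((p-j)%12, (p+j)%12): if table[k]=='_____': return k
def nearestFreeB (table : List String) (p : Int) : Option Int :=
  (PySem.List.pyRange 0 12 1).findSome? (fun j =>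
    let k1 := PySem.Int.mod (p - j) 12
    if PySem.List.pyGetD table k1 "" == "_____" then some k1
    else
      let k2 := PySem.Int.mod (p + j) 12
      if PySem.List.pyGetD table k2 "" == "_____" then some k2 else none)

def set_table_alt (the_dead : List String) : List String :=
  (PySem.List.slice the_dead none (some 12)).foldl
    (fun table name =>
      match PySem.Str.pyGet? name 0 with
      | none => table            -- Python: IndexError on name[0] (excluded by Pre_)
      | some c =>
        match cornersB.get? c with
        | none => table          -- Python: KeyError (excluded by Pre_)
        | some p =>
          match nearestFreeB table p with
          | some k => table.set k.toNat name
          | none => table)                                  -- unreachable: the table always has a free seat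
    (PySem.List.pyRepeat ["_____"] 12)

-- ===== PRECONDITION & SPEC =====
-- Pre_ excludes exactly the inputs on which A raises: a name among the first 12 that is
-- empty (IndexError on name[0]) or whose first character is not a CORNERS key (KeyError).
def Pre_set_table (the_dead : List String) : Prop :=
  ((the_dead.take 12).all (fun s =>
    match s.toList with
    | [] => false
    | c :: _ => "QUTHCRDMZWEVOXINGJFABKPLYS".toList.contains c)) = true
instance (the_dead : List String) : Decidable (Pre_set_table the_dead) := by
  unfold Pre_set_table; infer_instance

def pvWitness_set_table : List String := ["SMITH", "Quill", "Adams"]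

def Spec_set_table (the_dead : List String) (out : List String) : Prop := out = set_table_alt the_dead
instance (the_dead : List String) (out : List String) : Decidable (Spec_set_table the_dead out) := by unfold Spec_set_table; infer_instance

-- ===== CLAIM (what is proved, stated in full; the proofs are below) =====
def Claim_equal_set_table : Prop := ∀ (the_dead : List String), Dom_set_table the_dead → Pre_set_table the_dead → Spec_set_table the_dead (set_table the_dead)

-- ===== LEMMAS AND PROOFS =====

-- selection of the earlier of two indexed first hits (ties to the first)
def selectHit {β : Type} (o1 o2 : Option (β × Int)) : Option β :=
  match o1, o2 with
  | some (x1, d1), some (x2, d2) => some (if d1 ≤ d2 then x1 else x2)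
  | some (x1, _), none => some x1
  | none, some (x2, _) => some x2
  | none, none => none

-- the candidate seat at distance j in the negative / positive direction, if free
def negCand (table : List String) (p j : Int) : Option Int :=
  if PySem.List.pyGetD table (PySem.Int.mod (p - j) 12) "" == "_____"
  then some (PySem.Int.mod (p - j) 12) else none

def posCand (table : List String) (p j : Int) : Option Int :=
  if PySem.List.pyGetD table (PySem.Int.mod (p + j) 12) "" == "_____"
  then some (PySem.Int.mod (p + j) 12) else none

lemma snd_mem_of_findSome {β : Type} (f : Int → Option β) :
    ∀ (l : List Int) (x : β) (d : Int),
      l.findSome? (fun j => (f j).map (fun y => (y, j))) = some (x, d) → d ∈ l := by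
  intro l
  induction l with
  | nil => intro x d h; simp at h
  | cons j t ih =>
    intro x d h
    rw [List.findSome?_cons] at h
    cases hf : f j with
    | some y => rw [hf] at h; simp_all
    | none => rw [hf] at h; simp only [Option.map_none] at h
              exact List.mem_cons_of_mem _ (ih _ _ h)

-- interleaving two first-hit scans over one strictly increasing index list equals
-- running them separately and keeping the earlier hit (ties to the first scan)
lemma findSome_interleave {β : Type} (a b : Int → Option β) :
    ∀ (l : List Int), l.Pairwise (· < ·) →
      l.findSome? (fun j => (a j).or (b j)) =
        selectHit (l.findSome? (fun j => (a j).map (fun y => (y, j))))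
                  (l.findSome? (fun j => (b j).map (fun y => (y, j)))) := by
  intro l
  induction l with
  | nil => intro _; simp [selectHit]
  | cons j t ih =>
    intro hp
    have hlt : ∀ y ∈ t, j < y := (List.pairwise_cons.mp hp).1
    have hpt : t.Pairwise (· < ·) := (List.pairwise_cons.mp hp).2
    rw [List.findSome?_cons, List.findSome?_cons, List.findSome?_cons]
    cases ha : a j with
    | some x =>
      simp only [Option.map_some, Option.or]
      cases hbj : b j with
      | some y => simp [selectHit]
      | none =>
        simp only [Option.map_none]
        cases hb : t.findSome? (fun j => (b j).map (fun y => (y, j))) with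
        | some pr =>
          obtain ⟨x2, d2⟩ := pr
          have : j ≤ d2 := le_of_lt (hlt _ (snd_mem_of_findSome b t x2 d2 hb))
          simp [selectHit, this]
        | none => simp [selectHit]
    | none =>
      simp only [Option.map_none, Option.or]
      cases hbj : b j with
      | some y =>
        simp only [Option.map_some]
        cases ha' : t.findSome? (fun j => (a j).map (fun y => (y, j))) with
        | some pr =>
          obtain ⟨x1, d1⟩ := pr
          have : ¬ d1 ≤ j := not_le.mpr (hlt _ (snd_mem_of_findSome a t x1 d1 ha'))
          simp [selectHit, this]
        | none => simp [selectHit]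
      | none => exact ih hpt

lemma map_if_some {α β : Type} (c : Prop) [Decidable c] (x : α) (f : α → β) :
    (if c then some x else none).map (fun y => f y) = if c then some (f x) else none := by
  split <;> rfl

lemma or_if_some {α : Type} (c : Prop) [Decidable c] (x : α) (o : Option α) :
    (if c then some x else none).or o = if c then some x else o := by
  split <;> rfl

-- B's single interleaved scan computes exactly A's two-scan selection
lemma seat_select (table : List String) (p : Int) :
    nearestFreeB table p =
      selectHit (findSeatA table p (-1)) (findSeatA table p 1) := by
  have hA : findSeatA table p (-1) =
      (PySem.List.pyRange 0 12 1).findSome? (fun j => (negCand table p j).map (fun y => (y, j))) := by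
    unfold findSeatA negCand
    congr 1
    funext j
    have h2 : p + (-1) * j = p - j := by ring
    rw [h2, map_if_some]
  have hB : findSeatA table p 1 =
      (PySem.List.pyRange 0 12 1).findSome? (fun j => (posCand table p j).map (fun y => (y, j))) := by
    unfold findSeatA posCand
    congr 1
    funext j
    have h2 : p + 1 * j = p + j := by ring
    rw [h2, map_if_some]
  have hN : nearestFreeB table p =
      (PySem.List.pyRange 0 12 1).findSome? (fun j => (negCand table p j).or (posCand table p j)) := by
    unfold nearestFreeB negCand posCand
    congr 1
    funext j
    rw [or_if_some]
  rw [hA, hB, hN]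
  exact findSome_interleave (negCand table p) (posCand table p)
    _ (PySem.List.pairwise_lt_pyRange_one 0 12)

lemma corners_agree_all : ("QUTHCRDMZWEVOXINGJFABKPLYS".toList.all
    (fun c => cornersA.get? c == cornersB.get? c)) = true := by rfl

lemma corners_agree : ∀ c ∈ "QUTHCRDMZWEVOXINGJFABKPLYS".toList,
    cornersA.get? c = cornersB.get? c := by
  intro c hc
  exact eq_of_beq (List.all_eq_true.mp corners_agree_all c hc)

-- the two per-guest loop bodies agree on every name admitted by Pre_
lemma step_eq (name : String)
    (h : match name.toList with
         | [] => False
         | c :: _ => "QUTHCRDMZWEVOXINGJFABKPLYS".toList.contains c = true) :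
    ∀ table : List String,
      (match PySem.Str.pyGet? name 0 with
       | none => table
       | some c =>
         match cornersA.get? c with
         | none => table
         | some p =>
           match findSeatA table p (-1), findSeatA table p 1 with
           | some (p1, d1), some (p2, d2) =>
               table.set (if d1 ≤ d2 then p1 else p2).toNat name
           | some (p1, _), none => table.set p1.toNat name
           | none, some (p2, _) => table.set p2.toNat name
           | none, none => table) =
      (match PySem.Str.pyGet? name 0 with
       | none => table
       | some c =>
         match cornersB.get? c with
         | none => table
         | some p =>
           match nearestFreeB table p with
           | some k => table.set k.toNat name
           | none => table) := by
  intro table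
  cases hl : name.toList with
  | nil => rw [hl] at h; exact absurd h (by simp)
  | cons c rest =>
    rw [hl] at h
    have hget : PySem.Str.pyGet? name 0 = some c := by
      have h0 : PySem.Str.pyGet? name ((0 : Nat) : Int) = name.toList[(0 : Nat)]? :=
        PySem.Str.pyGet?_natCast name 0
      rw [hl] at h0
      exact_mod_cast h0
    simp only [hget]
    have hc : c ∈ "QUTHCRDMZWEVOXINGJFABKPLYS".toList :=
      List.contains_iff_mem.mp h
    rw [corners_agree c hc]
    cases cornersB.get? c with
    | none => rfl
    | some p =>
      dsimp only
      rw [seat_select table p]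
      cases h1 : findSeatA table p (-1) with
      | some pr1 =>
        obtain ⟨p1, d1⟩ := pr1
        cases h2 : findSeatA table p 1 with
        | some pr2 => obtain ⟨p2, d2⟩ := pr2; simp [selectHit]
        | none => simp [selectHit]
      | none =>
        cases h2 : findSeatA table p 1 with
        | some pr2 => obtain ⟨p2, d2⟩ := pr2; simp [selectHit]
        | none => simp [selectHit]

lemma slice_twelve (xs : List String) :
    PySem.List.slice xs none (some 12) = xs.take 12 := by
  exact_mod_cast PySem.List.slice_to_natCast xs 12

-- ===== VERDICT (by name: the statement is the Claim_ definition above) =====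
theorem set_table_spec : Claim_equal_set_table := by
  intro the_dead _hdom hpre
  unfold Spec_set_table set_table set_table_alt
  apply PySem.List.foldl_congr_mem'
  intro name hmem table
  have hmem' : name ∈ the_dead.take 12 := by rwa [slice_twelve] at hmem
  have h := List.all_eq_true.mp hpre name hmem'
  apply step_eq
  cases hl : name.toList with
  | nil => rw [hl] at h; simp at h
  | cons c rest => rw [hl] at h; exact h
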